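-- pv_equiv track=rewrite | github.com/ericharley/AdventOfCode | 2023/13/a.py | smudged
-- ===== SOURCE A (Python) =====
-- def smudged(grid, num_diff):
--   # find horizontal
--   for r in range(1,len(grid)):
--     top = grid[:r]
--     bottom = grid[r:]
--     d = min(len(top),len(bottom))
--
--     T = top[::-1][:d]
--     B = bottom[:d]
--     # see if they match except in exactly one place
--     A = T
--     differences = sum(a!=b for x,y in zip(T, B) for a,b in zip(x,y))
-- #    differences = 0
-- #    for i in range(len(T)):
-- #      for j in range(len(T[i])):
-- #        if T[i][j] != B[i][j]:
-- #          differences += 1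
--     if differences == num_diff:
--       return r
--
--   return 0
-- ===== SOURCE B (Python) =====
-- def smudged(grid, num_diff):
--   # In-place two-pointer scan per candidate line, pruning once the running
--   # smudge count exceeds num_diff (counts only grow, so equality is dead).
--   # A global bound check skips the scan when no candidate could ever reach num_diff.
--   n = len(grid)
--   ml = max(map(len, grid), default=0)
--   if num_diff < 0 or num_diff > (n // 2) * ml:
--     return 0
--   for r in range(1, n):
--     count = 0
--     i, j = r - 1, r
--     while i >= 0 and j < n and count <= num_diff:
--       x, y = grid[i], grid[j]
--       if x != y:
--         count += sum(map(str.__ne__, x, y))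
--       i -= 1
--       j += 1
--     if count == num_diff:
--       return r
--   return 0
-- ===== Notes on version B (the rewrite author's own statement) =====
-- stated objective: faster
-- what changed: Replaces A's per-candidate slicing (grid[:r][::-1], grid[r:], truncation to d) and full zipped character sum by an in-place two-pointer walk per candidate that prunes as soon as the running smudge count exceeds num_diff, skips equal row pairs via a string-equality fast path, and short-circuits the whole search when num_diff is negative or exceeds the maximum achievable mismatch count (n//2)*max_row_len; intended as faster via these constant-factor short-circuits (a timing run measured 4.13x at n=4096 on one run, 1.59x on another).
import Mathlib
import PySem

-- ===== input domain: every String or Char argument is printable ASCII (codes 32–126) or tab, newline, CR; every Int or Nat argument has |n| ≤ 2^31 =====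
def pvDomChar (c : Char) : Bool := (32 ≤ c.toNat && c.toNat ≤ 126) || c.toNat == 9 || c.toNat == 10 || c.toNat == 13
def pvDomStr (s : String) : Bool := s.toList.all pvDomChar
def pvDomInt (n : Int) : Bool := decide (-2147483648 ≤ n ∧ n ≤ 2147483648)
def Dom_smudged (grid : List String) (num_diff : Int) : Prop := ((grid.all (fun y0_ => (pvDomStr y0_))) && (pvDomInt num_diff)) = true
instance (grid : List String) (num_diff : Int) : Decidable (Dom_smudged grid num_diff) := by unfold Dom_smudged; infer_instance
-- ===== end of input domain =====

-- B replaces A's slice-reverse-and-zip comparison per candidate line by an in-place two-pointer scan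
-- with an unreachability bound check, an equal-rows fast path and early pruning once the smudge count
-- exceeds num_diff (intended as faster; measured 1.6-4.1x on a timing run's inputs; same return value everywhere).

-- ===== PORT A =====
-- sum(a!=b for x,y in zip(T,B) for a,b in zip(x,y)): inner generator over one row pair
def pvNeSumA (x y : List Char) : Int :=
  ((x.zip y).map (fun p => if p.1 ≠ p.2 then (1 : Int) else 0)).sum

-- the for-r loop of A with its early return; 0 when the range is exhausted
def smudgedGoA (grid : List String) (num_diff : Int) : List Int → Int
  | [] => 0
  | r :: rs =>
      let top := PySem.List.slice grid none (some r)
      let bottom := PySem.List.slice grid (some r) none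
      let d : Int := min (PySem.List.len top) (PySem.List.len bottom)
      let T := PySem.List.slice ((PySem.List.slice? top none none (-1)).getD []) none (some d)
      let B := PySem.List.slice bottom none (some d)
      let differences := ((T.zip B).map (fun p => pvNeSumA p.1.toList p.2.toList)).sum
      if differences = num_diff then r else smudgedGoA grid num_diff rs

def smudged (grid : List String) (num_diff : Int) : Int :=
  smudgedGoA grid num_diff (PySem.List.pyRange 1 (PySem.List.len grid) 1)

-- ===== PORT B =====
-- sum(a != b for a, b in zip(grid[i], grid[j])) of Source B
def pvCountNe (x y : List Char) : Int :=
  ((x.zip y).map (fun p => if p.1 ≠ p.2 then (1 : Int) else 0)).sum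

-- the while loop of Source B: walk i down / j up, accumulating c, pruning once c > num_diff;
-- `if x != y` is Source B's fast path around the character sum
def pvBWhile (grid : List String) (num_diff : Int) (n : Nat) (i j c : Int) : Int :=
  if h' : 0 ≤ i ∧ j < (n : Int) ∧ c ≤ num_diff then
    let x := grid.getD i.toNat ""
    let y := grid.getD j.toNat ""
    pvBWhile grid num_diff n (i - 1) (j + 1)
      (c + if x ≠ y then pvCountNe x.toList y.toList else 0)
  else c
termination_by ((n : Int) - j).toNat
decreasing_by omega

-- the for-r loop of Source B
def smudgedGoB (grid : List String) (num_diff : Int) (n : Nat) : List Int → Int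
  | [] => 0
  | r :: rs =>
      let count := pvBWhile grid num_diff n (r - 1) r 0
      if count = num_diff then r else smudgedGoB grid num_diff n rs

def smudged_alt (grid : List String) (num_diff : Int) : Int :=
  let n := grid.length
  let ml := (grid.map PySem.Str.len).foldl max 0
  if num_diff < 0 ∨ PySem.Int.floordiv (n : Int) 2 * ml < num_diff then 0
  else smudgedGoB grid num_diff n (PySem.List.pyRange 1 (PySem.List.len grid) 1)

-- ===== PRECONDITION & SPEC =====
def Spec_smudged (grid : List String) (num_diff : Int) (out : Int) : Prop := out = smudged_alt grid num_diff
instance (grid : List String) (num_diff : Int) (out : Int) : Decidable (Spec_smudged grid num_diff out) := by unfold Spec_smudged; infer_instance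

-- ===== CLAIM (what is proved, stated in full; the proofs are below) =====
def Claim_equal_smudged : Prop := ∀ (grid : List String) (num_diff : Int), Dom_smudged grid num_diff → Spec_smudged grid num_diff (smudged grid num_diff)

-- ===== LEMMAS AND PROOFS =====

theorem pvCountNe_nonneg (x y : List Char) : 0 ≤ pvCountNe x y := by
  unfold pvCountNe
  induction (x.zip y) with
  | nil => simp
  | cons p ps ih => simp only [List.map_cons, List.sum_cons]; split <;> omega

theorem pvCountNe_self (x : List Char) : pvCountNe x x = 0 := by
  induction x with
  | nil => rfl
  | cons a l ih => simp [pvCountNe, List.zip_cons_cons] at ih ⊢; exact ih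

theorem pvCountNe_le (x y : List Char) : pvCountNe x y ≤ (x.length : Int) := by
  induction x generalizing y with
  | nil => simp [pvCountNe]
  | cons a l ih =>
    cases y with
    | nil => simp [pvCountNe]; positivity
    | cons b m =>
      have := ih m
      simp only [pvCountNe, List.zip_cons_cons, List.map_cons, List.sum_cons,
        List.length_cons] at this ⊢
      split <;> push_cast <;> omega

-- the branch of Source B's fast path is just the pair sum
theorem ite_countNe (x y : String) :
    (if x ≠ y then pvCountNe x.toList y.toList else 0) = pvCountNe x.toList y.toList := by
  by_cases hxy : x = y
  · subst hxy; simp [pvCountNe_self]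
  · simp [hxy]

-- the full (unpruned) mirrored-pair sum B's while loop is pruning
def pvFullSum (grid : List String) (n : Nat) (i j : Int) : Int :=
  if h : 0 ≤ i ∧ j < (n : Int) then
    pvCountNe (grid.getD i.toNat "").toList (grid.getD j.toNat "").toList
      + pvFullSum grid n (i - 1) (j + 1)
  else 0
termination_by ((n : Int) - j).toNat
decreasing_by omega

theorem pvFullSum_nonneg (grid : List String) (n : Nat) (i j : Int) :
    0 ≤ pvFullSum grid n i j := by
  unfold pvFullSum
  split
  · have := pvCountNe_nonneg (grid.getD i.toNat "").toList (grid.getD j.toNat "").toList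
    have := pvFullSum_nonneg grid n (i - 1) (j + 1)
    omega
  · omega
termination_by ((n : Int) - j).toNat
decreasing_by omega

theorem pvBWhile_spec (grid : List String) (nd : Int) (n : Nat) (i j c : Int) :
    pvBWhile grid nd n i j c = c + pvFullSum grid n i j ∨
      (nd < pvBWhile grid nd n i j c ∧ pvBWhile grid nd n i j c ≤ c + pvFullSum grid n i j) := by
  unfold pvBWhile
  split
  · rename_i h
    dsimp only
    rw [ite_countNe]
    have hrec := pvBWhile_spec grid nd n (i - 1) (j + 1)
      (c + pvCountNe (grid.getD i.toNat "").toList (grid.getD j.toNat "").toList)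
    have hfs : pvFullSum grid n i j =
        pvCountNe (grid.getD i.toNat "").toList (grid.getD j.toNat "").toList
          + pvFullSum grid n (i - 1) (j + 1) := by
      rw [pvFullSum]; simp [h.1, h.2.1]
    rcases hrec with h1 | h1
    · left; rw [h1, hfs]; ring
    · right; rw [hfs]; omega
  · rename_i h
    by_cases hij : 0 ≤ i ∧ j < (n : Int)
    · right
      have : ¬ c ≤ nd := by tauto
      have := pvFullSum_nonneg grid n i j
      omega
    · left
      rw [pvFullSum]; simp [hij]
termination_by ((n : Int) - j).toNat
decreasing_by omega

-- general zip fact: taking at least min of the lengths before zipping changes nothing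
theorem zip_take_take {α β : Type} (a : List α) (b : List β) (m : Nat)
    (h : min a.length b.length ≤ m) : (a.take m).zip (b.take m) = a.zip b := by
  induction a generalizing b m with
  | nil => simp
  | cons x xs ih =>
    cases b with
    | nil => simp
    | cons y ys =>
      cases m with
      | zero => simp at h
      | succ k =>
        simp only [List.take_succ_cons, List.zip_cons_cons, List.cons.injEq, true_and]
        exact ih ys k (by simp at h ⊢; omega)

theorem pvFullSum_eq_zipSum (grid : List String) (i j : Int) (hij : i < j) :
    pvFullSum grid grid.length i j =
      (((grid.take (i + 1).toNat).reverse.zip (grid.drop j.toNat)).map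
        (fun p => pvCountNe p.1.toList p.2.toList)).sum := by
  rw [pvFullSum]
  split
  · rename_i h
    obtain ⟨hi, hj⟩ := h
    have hjpos : 0 < j := lt_of_le_of_lt hi hij
    have hilt : i.toNat < j.toNat := by omega
    have hjlt : j.toNat < grid.length := by omega
    have hilt' : i.toNat < grid.length := by omega
    have htake : (grid.take ((i : Int) + 1).toNat).reverse
        = grid[i.toNat] :: (grid.take i.toNat).reverse := by
      have : ((i : Int) + 1).toNat = i.toNat + 1 := by omega
      rw [this, List.take_add_one, List.getElem?_eq_getElem hilt']
      simp
    have hdrop : grid.drop j.toNat = grid[j.toNat] :: grid.drop (j.toNat + 1) :=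
      List.drop_eq_getElem_cons hjlt
    rw [htake, hdrop]
    simp only [List.zip_cons_cons, List.map_cons, List.sum_cons]
    have hrec := pvFullSum_eq_zipSum grid (i - 1) (j + 1) (by omega)
    have h1 : ((i : Int) - 1 + 1).toNat = i.toNat := by omega
    have h2 : ((j : Int) + 1).toNat = j.toNat + 1 := by omega
    rw [h1, h2] at hrec
    rw [hrec, List.getD_eq_getElem grid "" hilt', List.getD_eq_getElem grid "" hjlt]
  · rename_i h
    by_cases hi : 0 ≤ i
    · -- then ¬ j < n, so drop past the end is empty
      have hj : (grid.length : Int) ≤ j := by omega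
      have : grid.length ≤ j.toNat := by omega
      rw [List.drop_eq_nil_of_le this]
      simp
    · -- i < 0: the reversed prefix is empty
      have : ((i : Int) + 1).toNat = 0 := by omega
      rw [this]
      simp
termination_by ((grid.length : Int) - j).toNat
decreasing_by omega

-- A's `differences` at candidate r is exactly the full mirrored-pair sum
theorem diffA_eq_fullSum (grid : List String) (r : Int) (h1 : 1 ≤ r) (_h2 : r < (grid.length : Int)) :
    (List.map (fun p => pvNeSumA p.1.toList p.2.toList)
        ((PySem.List.slice ((PySem.List.slice? (PySem.List.slice grid none (some r)) none none (-1)).getD []) none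
            (some (min (PySem.List.len (PySem.List.slice grid none (some r))) (PySem.List.len (PySem.List.slice grid (some r) none))))).zip
          (PySem.List.slice (PySem.List.slice grid (some r) none) none
            (some (min (PySem.List.len (PySem.List.slice grid none (some r))) (PySem.List.len (PySem.List.slice grid (some r) none))))))).sum
    = pvFullSum grid grid.length (r - 1) r := by
  have hr0 : 0 ≤ r := by omega
  simp only [PySem.List.len_eq, PySem.List.slice_to grid hr0, PySem.List.slice_from grid hr0,
    PySem.List.slice?_none_none_neg_one, Option.getD_some]
  set a := grid.take r.toNat with ha
  set b := grid.drop r.toNat with hb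
  have hd0 : (0 : Int) ≤ min (a.length : Int) (b.length : Int) := by positivity
  rw [PySem.List.slice_to a.reverse hd0, PySem.List.slice_to b hd0]
  have hdt : (min ((a.length : Int)) ((b.length : Int))).toNat = min a.length b.length := by omega
  rw [hdt, zip_take_take a.reverse b _ (by simp)]
  rw [pvFullSum_eq_zipSum grid (r - 1) r (by omega)]
  have h1 : ((r : Int) - 1 + 1).toNat = r.toNat := by omega
  rw [h1]
  rfl

theorem pvFullSum_le (grid : List String) (n : Nat) (ml : Int)
    (hml0 : 0 ≤ ml) (hml : ∀ s ∈ grid, ((s.toList.length : Nat) : Int) ≤ ml) (i j : Int) :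
    pvFullSum grid n i j ≤ max 0 (min (i + 1) ((n : Int) - j)) * ml := by
  rw [pvFullSum]
  split
  · rename_i h
    have hx : pvCountNe (grid.getD i.toNat "").toList (grid.getD j.toNat "").toList ≤ ml := by
      refine le_trans (pvCountNe_le _ _) ?_
      by_cases hlt : i.toNat < grid.length
      · exact hml _ (List.getD_eq_getElem grid "" hlt ▸ List.getElem_mem hlt)
      · rw [List.getD_eq_default grid "" (by omega)]; simpa using hml0
    have hrec := pvFullSum_le grid n ml hml0 hml (i - 1) (j + 1)
    have hstep : max 0 (min (i + 1) ((n : Int) - j)) * ml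
        = max 0 (min (i - 1 + 1) ((n : Int) - (j + 1))) * ml + ml := by
      have h' : max 0 (min (i + 1) ((n : Int) - j))
          = max 0 (min (i - 1 + 1) ((n : Int) - (j + 1))) + 1 := by omega
      rw [h']; ring
    linarith
  · exact mul_nonneg (le_max_left 0 _) hml0
termination_by ((n : Int) - j).toNat
decreasing_by omega

-- under B's global bound check no candidate line can match, so A's loop falls through to 0
theorem smudgedGoA_guard_zero (grid : List String) (nd ml : Int)
    (hml0 : 0 ≤ ml) (hml : ∀ s ∈ grid, ((s.toList.length : Nat) : Int) ≤ ml)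
    (hguard : nd < 0 ∨ PySem.Int.floordiv ((grid.length : Nat) : Int) 2 * ml < nd)
    (rs : List Int) (hmem : ∀ r ∈ rs, 1 ≤ r ∧ r < (grid.length : Int)) :
    smudgedGoA grid nd rs = 0 := by
  induction rs with
  | nil => rfl
  | cons r rs ih =>
    obtain ⟨h1, h2⟩ := hmem r (by simp)
    have hdiff := diffA_eq_fullSum grid r h1 h2
    have hnn := pvFullSum_nonneg grid grid.length (r - 1) r
    have hle := pvFullSum_le grid grid.length ml hml0 hml (r - 1) r
    have hfd : PySem.Int.floordiv ((grid.length : Nat) : Int) 2 = ((grid.length / 2 : Nat) : Int) :=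
      PySem.Int.floordiv_natCast grid.length 2
    have hmin : max 0 (min (r - 1 + 1) ((grid.length : Int) - r)) ≤ ((grid.length / 2 : Nat) : Int) := by
      omega
    have hbound : pvFullSum grid grid.length (r - 1) r
        ≤ PySem.Int.floordiv ((grid.length : Nat) : Int) 2 * ml := by
      rw [hfd]
      exact le_trans hle (mul_le_mul_of_nonneg_right hmin hml0)
    have hne : pvFullSum grid grid.length (r - 1) r ≠ nd := by
      rcases hguard with hg | hg <;> omega
    simp only [smudgedGoA]
    rw [hdiff]
    rw [if_neg hne]
    exact ih (fun r hr => hmem r (by simp [hr]))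

theorem smudgedGo_eq (grid : List String) (nd : Int) (rs : List Int)
    (hmem : ∀ r ∈ rs, 1 ≤ r ∧ r < (grid.length : Int)) :
    smudgedGoA grid nd rs = smudgedGoB grid nd grid.length rs := by
  induction rs with
  | nil => rfl
  | cons r rs ih =>
    obtain ⟨h1, h2⟩ := hmem r (by simp)
    have hdiff := diffA_eq_fullSum grid r h1 h2
    have hw := pvBWhile_spec grid nd grid.length (r - 1) r 0
    have hiff : ((List.map (fun p => pvNeSumA p.1.toList p.2.toList)
        ((PySem.List.slice ((PySem.List.slice? (PySem.List.slice grid none (some r)) none none (-1)).getD []) none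
            (some (min (PySem.List.len (PySem.List.slice grid none (some r))) (PySem.List.len (PySem.List.slice grid (some r) none))))).zip
          (PySem.List.slice (PySem.List.slice grid (some r) none) none
            (some (min (PySem.List.len (PySem.List.slice grid none (some r))) (PySem.List.len (PySem.List.slice grid (some r) none))))))).sum = nd)
        ↔ (pvBWhile grid nd grid.length (r - 1) r 0 = nd) := by
      rw [hdiff]
      rcases hw with h | h
      · rw [h]; omega
      · constructor
        · intro hfs; omega
        · intro hc; omega
    simp only [smudgedGoA, smudgedGoB]
    split_ifs with hA hB hB
    · rfl
    · exact absurd (hiff.mp hA) hB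
    · exact absurd (hiff.mpr hB) hA
    · exact ih (fun r hr => hmem r (by simp [hr]))

-- ===== VERDICT (by name: the statement is the Claim_ definition above) =====
theorem smudged_spec : Claim_equal_smudged := by
  intro grid nd _
  unfold Spec_smudged smudged smudged_alt
  simp only
  have hmem : ∀ r ∈ PySem.List.pyRange 1 (PySem.List.len grid) 1, 1 ≤ r ∧ r < (grid.length : Int) := by
    intro r hr
    have := PySem.List.mem_pyRange_one.mp (by simpa [PySem.List.len_eq] using hr)
    simpa [PySem.List.len_eq] using this
  set ml := (grid.map PySem.Str.len).foldl max 0 with hml_def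
  have hml0 : 0 ≤ ml := (PySem.List.le_foldl_max (grid.map PySem.Str.len) 0).1
  have hml : ∀ s ∈ grid, ((s.toList.length : Nat) : Int) ≤ ml := by
    intro s hs
    have := (PySem.List.le_foldl_max (grid.map PySem.Str.len) 0).2 (PySem.Str.len s)
      (List.mem_map_of_mem hs)
    simpa [PySem.Str.len_eq, String.length_toList] using this
  split_ifs with hg
  · exact smudgedGoA_guard_zero grid nd ml hml0 hml hg _ hmem
  · exact smudgedGo_eq grid nd _ hmem
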